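-- pv_equiv track=rewrite | github.com/anpythomas/coding-challenges | 7-8-2023/greenGlassDoor/python/main.py | step_through_with
-- ===== SOURCE A (Python) =====
-- def step_through_with(s):
--     # Declare variable called previousChar and set to empty string
--     previousChar = ""
--
--     # Iterate through string
--     for char in s:
--
--         # If current variable equals previousChar, return true
--         if char == previousChar:
--             return True
--         else:
--             previousChar = char
--
--
--     # If you make it to the end return false
--     return False
-- ===== SOURCE B (Python) =====
-- from itertools import groupby
--
--
-- def step_through_with(s):
--     # Partition s into maximal runs of equal characters; a run of length >= 2
--     # means two identical characters are adjacent.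
--     return any(sum(1 for _ in g) >= 2 for _, g in groupby(s))
-- ===== Notes on version B (the rewrite author's own statement) =====
-- stated objective: idiomatic
-- what changed: Replaced the explicit previousChar-tracking loop with itertools.groupby: the string is partitioned into maximal runs of equal characters and the result is whether any run has length >= 2.
import Mathlib
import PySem

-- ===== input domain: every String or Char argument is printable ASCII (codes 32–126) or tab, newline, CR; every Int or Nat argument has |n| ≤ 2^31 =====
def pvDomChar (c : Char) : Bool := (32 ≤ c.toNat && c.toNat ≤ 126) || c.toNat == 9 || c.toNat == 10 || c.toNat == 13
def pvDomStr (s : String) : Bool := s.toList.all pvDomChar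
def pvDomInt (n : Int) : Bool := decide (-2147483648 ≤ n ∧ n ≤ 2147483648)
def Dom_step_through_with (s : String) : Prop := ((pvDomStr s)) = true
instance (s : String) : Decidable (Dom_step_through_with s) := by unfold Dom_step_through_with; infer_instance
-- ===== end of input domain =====

-- B replaces the previousChar-tracking scan with a groupby-style partition into
-- maximal runs of equal characters, testing whether any run has length >= 2 (idiomatic).


-- ===== PORT A =====
-- loop over the characters with previousChar : String (initially ""), early return True
def pvStepA : List Char → String → Bool
  | [], _ => false
  | c :: rest, prev => if String.singleton c == prev then true else pvStepA rest (String.singleton c)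

def step_through_with (s : String) : Bool := pvStepA s.toList ""

-- ===== PORT B =====
-- groupby: split into maximal runs of equal characters
def pvRuns : List Char → List (List Char)
  | [] => []
  | c :: rest =>
    match pvRuns rest with
    | [] => [[c]]
    | [] :: gs => [c] :: [] :: gs
    | (d :: g) :: gs => if c == d then (c :: d :: g) :: gs else [c] :: (d :: g) :: gs

def step_through_with_alt (s : String) : Bool :=
  (pvRuns s.toList).any (fun g => decide (2 ≤ g.length))

-- ===== PRECONDITION & SPEC =====
def Spec_step_through_with (s : String) (out : Bool) : Prop := out = step_through_with_alt s
instance (s : String) (out : Bool) : Decidable (Spec_step_through_with s out) := by unfold Spec_step_through_with; infer_instance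

-- ===== CLAIM (what is proved, stated in full; the proofs are below) =====
def Claim_equal_step_through_with : Prop := ∀ (s : String), Dom_step_through_with s → Spec_step_through_with s (step_through_with s)

-- ===== LEMMAS AND PROOFS =====

-- reference predicate: some adjacent pair of equal characters
def pvAdj : List Char → Bool
  | a :: b :: t => a == b || pvAdj (b :: t)
  | _ => false

theorem pvStepA_singleton (l : List Char) (p : Char) :
    pvStepA l (String.singleton p) = pvAdj (p :: l) := by
  induction l generalizing p with
  | nil => simp [pvStepA, pvAdj]
  | cons c t ih =>
    simp only [pvStepA, pvAdj]
    by_cases h : c = p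
    · subst h; simp
    · have hs : (String.singleton c == String.singleton p) = false := by
        simp only [beq_eq_false_iff_ne, ne_eq]
        exact fun hh => h (by simpa using congrArg String.toList hh)
      have hc : (p == c) = false := by
        simp [show p ≠ c from fun hh => h hh.symm]
      simp [hs, hc, ih]

theorem pvStepA_empty (l : List Char) : pvStepA l "" = pvAdj l := by
  cases l with
  | nil => simp [pvStepA, pvAdj]
  | cons c t =>
    have hne : (String.singleton c == "") = false := by
      simp [String.singleton]
    simp only [pvStepA, hne, Bool.false_eq_true, if_false]
    exact pvStepA_singleton t c

-- the defining step of pvRuns on a two-or-more element list, with the tail's runs plugged in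
theorem pvRuns_step (c d : Char) (t : List Char) (g : List Char) (gs : List (List Char))
    (hg : pvRuns (d :: t) = (d :: g) :: gs) :
    pvRuns (c :: d :: t) =
      (if c == d then (c :: d :: g) :: gs else [c] :: (d :: g) :: gs) := by
  show (match pvRuns (d :: t) with
    | [] => [[c]]
    | [] :: gs => [c] :: [] :: gs
    | (e :: g) :: gs => if c == e then (c :: e :: g) :: gs else [c] :: (e :: g) :: gs) = _
  rw [hg]

theorem pvRuns_head : ∀ (c : Char) (t : List Char), ∃ g gs, pvRuns (c :: t) = (c :: g) :: gs
  | c, [] => ⟨[], [], rfl⟩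
  | c, d :: t' => by
    obtain ⟨g, gs, hg⟩ := pvRuns_head d t'
    rw [pvRuns_step c d t' g gs hg]
    by_cases h : c = d
    · subst h; exact ⟨c :: g, gs, by simp⟩
    · exact ⟨[], (d :: g) :: gs, by simp [h]⟩

theorem pvRuns_adj (l : List Char) :
    (pvRuns l).any (fun g => decide (2 ≤ g.length)) = pvAdj l := by
  induction l with
  | nil => simp [pvRuns, pvAdj]
  | cons c t ih =>
    cases t with
    | nil => simp [pvRuns, pvAdj]
    | cons d t' =>
      obtain ⟨g, gs, hg⟩ := pvRuns_head d t'
      rw [pvRuns_step c d t' g gs hg]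
      by_cases h : c = d
      · subst h
        simp only [beq_self_eq_true, if_true, pvAdj, Bool.true_or]
        simp
      · have hb : (c == d) = false := by simp [h]
        rw [hg] at ih
        simp only [hb, Bool.false_eq_true, if_false, pvAdj]
        simp [ih]

-- ===== VERDICT (by name: the statement is the Claim_ definition above) =====
theorem step_through_with_spec : Claim_equal_step_through_with := by
  intro s _
  unfold Spec_step_through_with step_through_with step_through_with_alt
  rw [pvStepA_empty, pvRuns_adj]
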